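-- pv_equiv track=rewrite | github.com/OwenZ0711/CFIcode | toolmodules/modules.py | time_2_bar_n_min
-- ===== SOURCE A (Python) =====
-- def time_2_bar_n_min(t, mode='30min'):
--     if mode == '30min':
--         bar_30_list = [90000, 100000, 103000, 110000, 113000, 133000, 140000, 143000, 153000]
--         for i, (t1, t2) in enumerate(zip(bar_30_list, bar_30_list[1:])):
--             if t1 < int(t) <= t2:
--                 return i + 1
--         # whichbar = {(93000, 100001): 1, (100001, 103001): 2, (103001, 110001): 3, (110001, 125801): 4,
--         #             (125801, 133001): 5, (133001, 140001): 6, (140001, 143001): 7, (143001, 150100): 8}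
--         # for key in whichbar.keys():
--         #     if key[0] <= int(t) < key[1]: return whichbar[key]
--     elif mode == '5min':
--         bar_5_list = [
--             90000,  93500,  94000,  94500,  95000,  95500, 100000, 100500, 101000,
--             101500, 102000, 102500, 103000, 103500, 104000, 104500, 105000,
--             105500, 110000, 110500, 111000, 111500, 112000, 112500, 113000,
--             130500, 131000, 131500, 132000, 132500, 133000, 133500, 134000,
--             134500, 135000, 135500, 140000, 140500, 141000, 141500, 142000,
--             142500, 143000, 143500, 144000, 144500, 145000, 145500, 153000
--         ]
--         for i, (t1, t2) in enumerate(zip(bar_5_list, bar_5_list[1:])):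
--             if t1 < int(t) <= t2:
--                 return i + 1
--     else: raise ValueError
-- ===== SOURCE B (Python) =====
-- def time_2_bar_n_min(t, mode='30min'):
--     if mode == '30min':
--         bars = [90000, 100000, 103000, 110000, 113000, 133000, 140000, 143000, 153000]
--     elif mode == '5min':
--         bars = [
--             90000,  93500,  94000,  94500,  95000,  95500, 100000, 100500, 101000,
--             101500, 102000, 102500, 103000, 103500, 104000, 104500, 105000,
--             105500, 110000, 110500, 111000, 111500, 112000, 112500, 113000,
--             130500, 131000, 131500, 132000, 132500, 133000, 133500, 134000,
--             134500, 135000, 135500, 140000, 140500, 141000, 141500, 142000,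
--             142500, 143000, 143500, 144000, 144500, 145000, 145500, 153000
--         ]
--     else:
--         raise ValueError
--     x = int(t)
--     # bars is strictly increasing, so the number of boundaries below x is the
--     # index of the interval (bars[idx-1], bars[idx]] containing x, when any.
--     idx = sum(1 for v in bars if v < x)
--     if 1 <= idx < len(bars):
--         return idx
--     return None
-- ===== Notes on version B (the rewrite author's own statement) =====
-- stated objective: simpler
-- what changed: Replaces A's enumerate-over-zipped-adjacent-pairs interval scan with a single count of boundaries strictly below int(t) plus one range check; the duplicated per-mode loop collapses into one shared tail.
import Mathlib
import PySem

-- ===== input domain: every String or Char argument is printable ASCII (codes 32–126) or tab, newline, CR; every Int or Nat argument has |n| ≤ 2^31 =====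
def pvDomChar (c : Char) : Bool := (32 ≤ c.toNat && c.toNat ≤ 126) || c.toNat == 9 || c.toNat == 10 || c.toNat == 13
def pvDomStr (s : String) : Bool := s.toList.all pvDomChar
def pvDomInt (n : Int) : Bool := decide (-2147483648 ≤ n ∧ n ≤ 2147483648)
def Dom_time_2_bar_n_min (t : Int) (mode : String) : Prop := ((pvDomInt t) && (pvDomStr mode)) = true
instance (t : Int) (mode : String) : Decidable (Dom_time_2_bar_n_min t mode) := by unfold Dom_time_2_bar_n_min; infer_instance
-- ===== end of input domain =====

-- B replaces A's enumerate-over-adjacent-pairs interval scan by counting boundaries below int(t)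
-- plus one range check (objective: simpler; both modes share one tail). Pre_ excludes the modes
-- on which A raises ValueError.


-- ===== PORT A =====
def pvBar30 : List Int := [90000, 100000, 103000, 110000, 113000, 133000, 140000, 143000, 153000]
def pvBar5 : List Int :=
  [ 90000,  93500,  94000,  94500,  95000,  95500, 100000, 100500, 101000,
   101500, 102000, 102500, 103000, 103500, 104000, 104500, 105000,
   105500, 110000, 110500, 111000, 111500, 112000, 112500, 113000,
   130500, 131000, 131500, 132000, 132500, 133000, 133500, 134000,
   134500, 135000, 135500, 140000, 140500, 141000, 141500, 142000,
   142500, 143000, 143500, 144000, 144500, 145000, 145500, 153000]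

-- for i, (t1, t2) in enumerate(zip(bar_list, bar_list[1:])): if t1 < int(t) <= t2: return i + 1
def pvScan (x : Int) : List (Int × Int) → Int → Option Int
  | [], _ => none
  | (t1, t2) :: rest, i => if t1 < x ∧ x ≤ t2 then some (i + 1) else pvScan x rest (i + 1)

def time_2_bar_n_min (t : Int) (mode : String) : Option Int :=
  if mode = "30min" then pvScan t (pvBar30.zip (pvBar30.drop 1)) 0     -- l[1:] = drop 1 (exact here)
  else if mode = "5min" then pvScan t (pvBar5.zip (pvBar5.drop 1)) 0
  else none     -- Python raises ValueError here; excluded by Pre_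

-- ===== PORT B =====
-- idx = sum(1 for v in bars if v < x); return idx if 1 <= idx < len(bars) else None
def pvAltCore (bars : List Int) (x : Int) : Option Int :=
  let idx := bars.countP (fun v => decide (v < x))
  if 1 ≤ idx ∧ idx < bars.length then some (idx : Int) else none

def time_2_bar_n_min_alt (t : Int) (mode : String) : Option Int :=
  if mode = "30min" then pvAltCore pvBar30 t
  else if mode = "5min" then pvAltCore pvBar5 t
  else none     -- Python raises ValueError here; excluded by Pre_

-- ===== PRECONDITION & SPEC =====
-- A raises ValueError on every mode other than '30min' / '5min'; exactly those are excluded.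
def Pre_time_2_bar_n_min (t : Int) (mode : String) : Prop := mode = "30min" ∨ mode = "5min"
instance (t : Int) (mode : String) : Decidable (Pre_time_2_bar_n_min t mode) := by
  unfold Pre_time_2_bar_n_min; infer_instance
def pvWitness_time_2_bar_n_min : Int × String := (100000, "30min")

def Spec_time_2_bar_n_min (t : Int) (mode : String) (out : Option Int) : Prop := out = time_2_bar_n_min_alt t mode
instance (t : Int) (mode : String) (out : Option Int) : Decidable (Spec_time_2_bar_n_min t mode out) := by unfold Spec_time_2_bar_n_min; infer_instance

-- ===== CLAIM (what is proved, stated in full; the proofs are below) =====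
def Claim_equal_time_2_bar_n_min : Prop := ∀ (t : Int) (mode : String), Dom_time_2_bar_n_min t mode → Pre_time_2_bar_n_min t mode → Spec_time_2_bar_n_min t mode (time_2_bar_n_min t mode)

-- ===== LEMMAS AND PROOFS =====

-- On a strictly increasing list, scanning adjacent pairs for the interval containing x
-- agrees with counting the boundaries strictly below x.
theorem pvScan_eq_count (x : Int) (l : List Int) (hl : l.Pairwise (· < ·)) (k : Int) :
    pvScan x (l.zip (l.drop 1)) k =
      (if 1 ≤ l.countP (fun v => decide (v < x)) ∧ l.countP (fun v => decide (v < x)) < l.length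
       then some (k + l.countP (fun v => decide (v < x))) else none) := by
  induction l generalizing k with
  | nil => simp [pvScan]
  | cons a rest ih =>
    cases rest with
    | nil => by_cases h : a < x <;> simp [pvScan, List.countP_cons, h]
    | cons b r =>
      obtain ⟨hafa, hrest⟩ := List.pairwise_cons.mp hl
      have hab : a < b := hafa b (by simp)
      have hz : ((a :: b :: r).zip ((a :: b :: r).drop 1))
          = (a, b) :: ((b :: r).zip ((b :: r).drop 1)) := rfl
      rw [hz]
      simp only [pvScan]
      by_cases h1 : a < x ∧ x ≤ b
      · -- match at the first pair: no later boundary is below x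
        have hc0 : (b :: r).countP (fun v => decide (v < x)) = 0 := by
          rw [List.countP_eq_zero]
          intro v hv
          have hbv : b ≤ v := by
            rcases List.mem_cons.mp hv with h | h
            · omega
            · exact le_of_lt ((List.pairwise_cons.mp hrest).1 v h)
          simp only [decide_eq_true_eq]
          omega
        rw [if_pos h1, List.countP_cons, hc0]
        simp [h1.1]
      · rw [if_neg h1, ih hrest (k + 1),
          show (a :: b :: r).countP (fun v => decide (v < x))
              = (b :: r).countP (fun v => decide (v < x))
                + (if decide (a < x) = true then 1 else 0) from List.countP_cons ..]
        by_cases ha : a < x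
        · -- x lies beyond b: shift the index by one
          have hbx : b < x := by by_contra hx; exact h1 ⟨ha, by omega⟩
          have hb1 : 1 ≤ (b :: r).countP (fun v => decide (v < x)) := by
            rw [List.countP_cons]
            simp [hbx]
          simp only [ha, decide_true, if_true]
          by_cases hcond : (b :: r).countP (fun v => decide (v < x)) < (b :: r).length
          · rw [if_pos ⟨hb1, hcond⟩, if_pos (by simp only [List.length_cons] at hcond ⊢; omega)]
            congr 1
            push_cast
            ring
          · rw [if_neg (fun hh => hcond hh.2),
              if_neg (by intro hh; apply hcond; simp only [List.length_cons] at hh ⊢; omega)]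
        · -- x is at or below the first boundary: no boundary is below x
          have hc0 : (b :: r).countP (fun v => decide (v < x)) = 0 := by
            rw [List.countP_eq_zero]
            intro v hv
            have hav : a < v := by
              rcases List.mem_cons.mp hv with h | h
              · omega
              · exact hafa v (List.mem_cons_of_mem b h)
            simp only [decide_eq_true_eq]
            omega
          rw [hc0]
          simp [ha]

-- ===== VERDICT (by name: the statement is the Claim_ definition above) =====
theorem time_2_bar_n_min_spec : Claim_equal_time_2_bar_n_min := by
  intro t mode _ hpre
  unfold Spec_time_2_bar_n_min
  rcases hpre with h | h <;> subst h <;>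
    simp only [time_2_bar_n_min, time_2_bar_n_min_alt, pvAltCore, String.reduceEq, reduceIte] <;>
    rw [pvScan_eq_count t _ (by decide) 0] <;> simp only [zero_add]
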